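-- pv_equiv track=rewrite | github.com/ryanalmb/AI-sports-outcome-predictor | query_generator.py | _generate_sport_specific_queries
-- ===== SOURCE A (Python) =====
-- from typing import List, Optional
--
-- def _generate_sport_specific_queries(team_a: str, team_b: str, sport_type: str) -> List[str]:
--     """Generate sport-specific queries based on the sport type."""
--     sport_queries = []
--
--     def _site_hint(q: str, sites: List[str]) -> List[str]:
--         # mix site: filters into some variants
--         hinted = [q]
--         for s in sites[:2]:  # at most 2 site hints to keep diversity
--             hinted.append(f"{q} site:{s}")
--         return hinted
--
--     soccer_sites = [
--         "bbc.com", "espn.com", "skysports.com", "theguardian.com",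
--         "whoscored.com", "transfermarkt.com", "uefa.com", "premierleague.com"
--     ]
--
--     if sport_type == "soccer":
--         base = [
--             f"{team_a} vs {team_b} match preview",
--             f"{team_a} starting XI vs {team_b}",
--             f"{team_b} manager tactical analysis",
--             f"{team_a} vs {team_b} injury update",
--             f"{team_a} vs {team_b} press conference"
--         ]
--         for q in base:
--             sport_queries.extend(_site_hint(q, soccer_sites))
--     elif sport_type == "basketball":
--         base = [
--             f"{team_a} vs {team_b} season stats comparison",
--             f"{team_a} star player performance vs {team_b}",
--             f"{team_b} injury report and depth chart"
--         ]
--         for q in base: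
--             sport_queries.append(q)
--     elif sport_type == "tennis":
--         base = [
--             f"{team_a} vs {team_b} head to head statistics",
--             f"{team_a} recent tournament form",
--             f"{team_b} surface preference analysis"
--         ]
--         for q in base:
--             sport_queries.append(q)
--     elif sport_type == "american football":
--         base = [
--             f"{team_a} vs {team_b} season record",
--             f"{team_a} offensive strategy vs {team_b} defense",
--             f"{team_b} quarterback performance analysis"
--         ]
--         for q in base:
--             sport_queries.append(q)
--     elif sport_type == "baseball":
--         base = [
--             f"{team_a} vs {team_b} pitching matchup",
--             f"{team_a} batting order analysis",
--             f"{team_b} bullpen situation report"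
--         ]
--         for q in base:
--             sport_queries.append(q)
--     elif sport_type == "hockey":
--         base = [
--             f"{team_a} vs {team_b} power play statistics",
--             f"{team_a} goaltender matchup analysis",
--             f"{team_b} injury report and lineup news"
--         ]
--         for q in base:
--             sport_queries.append(q)
--     elif sport_type == "golf":
--         base = [
--             f"{team_a} vs {team_b} course history",
--             f"{team_a} recent tournament results",
--             f"{team_b} putting statistics this season"
--         ]
--         for q in base:
--             sport_queries.append(q)
--     else:
--         base = [
--             f"{team_a} vs {team_b} latest news",
--             f"{team_a} key players to watch vs {team_b}",
--             f"{team_b} tactical analysis and strategy",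
--         ]
--         for q in base:
--             sport_queries.append(q)
--
--     return sport_queries
-- ===== SOURCE B (Python) =====
-- from typing import List
--
-- # tiny template language: token 0 = team_a placeholder, 1 = team_b placeholder, str = literal
-- _A = 0
-- _B = 1
--
-- _TEMPLATES = {
--     "soccer": [
--         [_A, " vs ", _B, " match preview"],
--         [_A, " starting XI vs ", _B],
--         [_B, " manager tactical analysis"],
--         [_A, " vs ", _B, " injury update"],
--         [_A, " vs ", _B, " press conference"],
--     ],
--     "basketball": [
--         [_A, " vs ", _B, " season stats comparison"],
--         [_A, " star player performance vs ", _B],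
--         [_B, " injury report and depth chart"],
--     ],
--     "tennis": [
--         [_A, " vs ", _B, " head to head statistics"],
--         [_A, " recent tournament form"],
--         [_B, " surface preference analysis"],
--     ],
--     "american football": [
--         [_A, " vs ", _B, " season record"],
--         [_A, " offensive strategy vs ", _B, " defense"],
--         [_B, " quarterback performance analysis"],
--     ],
--     "baseball": [
--         [_A, " vs ", _B, " pitching matchup"],
--         [_A, " batting order analysis"],
--         [_B, " bullpen situation report"],
--     ],
--     "hockey": [
--         [_A, " vs ", _B, " power play statistics"],
--         [_A, " goaltender matchup analysis"],
--         [_B, " injury report and lineup news"],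
--     ],
--     "golf": [
--         [_A, " vs ", _B, " course history"],
--         [_A, " recent tournament results"],
--         [_B, " putting statistics this season"],
--     ],
-- }
--
-- _DEFAULT = [
--     [_A, " vs ", _B, " latest news"],
--     [_A, " key players to watch vs ", _B],
--     [_B, " tactical analysis and strategy"],
-- ]
--
-- _SOCCER_SUFFIXES = [" site:bbc.com", " site:espn.com"]
--
-- def _generate_sport_specific_queries(team_a: str, team_b: str, sport_type: str) -> List[str]:
--     def render(tmpl):
--         return "".join(
--             team_a if tok == _A else team_b if tok == _B else tok for tok in tmpl
--         )
--     queries = [render(t) for t in _TEMPLATES.get(sport_type, _DEFAULT)]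
--     if sport_type == "soccer":
--         queries = [q + suf for q in queries for suf in [""] + _SOCCER_SUFFIXES]
--     return queries
-- ===== Notes on version B (the rewrite author's own statement) =====
-- stated objective: alternative
-- what changed: Replaces A's if/elif chain of f-string lists and its site-hint helper by a tiny template interpreter: a table of token lists (placeholder markers plus literal segments) rendered by one join-based rendering pass, with the soccer case expanded as a uniform query x suffix product.
import Mathlib
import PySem

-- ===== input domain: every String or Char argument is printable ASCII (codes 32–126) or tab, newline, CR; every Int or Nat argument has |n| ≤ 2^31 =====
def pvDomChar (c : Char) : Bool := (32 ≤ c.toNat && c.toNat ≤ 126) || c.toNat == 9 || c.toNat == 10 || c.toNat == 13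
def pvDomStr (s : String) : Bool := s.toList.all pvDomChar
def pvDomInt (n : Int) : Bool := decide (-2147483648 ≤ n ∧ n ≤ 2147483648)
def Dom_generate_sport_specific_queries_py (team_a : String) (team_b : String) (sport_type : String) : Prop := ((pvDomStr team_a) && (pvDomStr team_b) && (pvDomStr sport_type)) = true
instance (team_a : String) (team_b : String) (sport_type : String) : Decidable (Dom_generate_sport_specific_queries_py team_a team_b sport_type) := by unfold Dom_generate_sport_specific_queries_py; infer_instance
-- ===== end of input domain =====

-- B replaces A's if/elif chain of f-string lists and its site-hint helper by a token-list template table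
-- rendered through one join-based interpreter, with a uniform query×suffix product for soccer (objective: alternative).
-- ===== PORT A =====
-- literal transliteration of A: nested site-hint helper, if/elif chain, append loops into sport_queries
def a_site_hint (q : String) (sites : List String) : List String :=
  (sites.take 2).foldl (fun hinted s => hinted ++ [q ++ " site:" ++ s]) [q]

def a_soccer_sites : List String :=
  ["bbc.com", "espn.com", "skysports.com", "theguardian.com",
   "whoscored.com", "transfermarkt.com", "uefa.com", "premierleague.com"]

def generate_sport_specific_queries_py (team_a : String) (team_b : String) (sport_type : String) : List String :=
  let sport_queries : List String := []
  if sport_type == "soccer" then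
    let base := [team_a ++ " vs " ++ team_b ++ " match preview",
                 team_a ++ " starting XI vs " ++ team_b,
                 team_b ++ " manager tactical analysis",
                 team_a ++ " vs " ++ team_b ++ " injury update",
                 team_a ++ " vs " ++ team_b ++ " press conference"]
    base.foldl (fun acc q => acc ++ a_site_hint q a_soccer_sites) sport_queries
  else if sport_type == "basketball" then
    let base := [team_a ++ " vs " ++ team_b ++ " season stats comparison",
                 team_a ++ " star player performance vs " ++ team_b,
                 team_b ++ " injury report and depth chart"]
    base.foldl (fun acc q => acc ++ [q]) sport_queries
  else if sport_type == "tennis" then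
    let base := [team_a ++ " vs " ++ team_b ++ " head to head statistics",
                 team_a ++ " recent tournament form",
                 team_b ++ " surface preference analysis"]
    base.foldl (fun acc q => acc ++ [q]) sport_queries
  else if sport_type == "american football" then
    let base := [team_a ++ " vs " ++ team_b ++ " season record",
                 team_a ++ " offensive strategy vs " ++ team_b ++ " defense",
                 team_b ++ " quarterback performance analysis"]
    base.foldl (fun acc q => acc ++ [q]) sport_queries
  else if sport_type == "baseball" then
    let base := [team_a ++ " vs " ++ team_b ++ " pitching matchup",
                 team_a ++ " batting order analysis",
                 team_b ++ " bullpen situation report"]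
    base.foldl (fun acc q => acc ++ [q]) sport_queries
  else if sport_type == "hockey" then
    let base := [team_a ++ " vs " ++ team_b ++ " power play statistics",
                 team_a ++ " goaltender matchup analysis",
                 team_b ++ " injury report and lineup news"]
    base.foldl (fun acc q => acc ++ [q]) sport_queries
  else if sport_type == "golf" then
    let base := [team_a ++ " vs " ++ team_b ++ " course history",
                 team_a ++ " recent tournament results",
                 team_b ++ " putting statistics this season"]
    base.foldl (fun acc q => acc ++ [q]) sport_queries
  else
    let base := [team_a ++ " vs " ++ team_b ++ " latest news",
                 team_a ++ " key players to watch vs " ++ team_b,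
                 team_b ++ " tactical analysis and strategy"]
    base.foldl (fun acc q => acc ++ [q]) sport_queries

-- ===== PORT B =====
-- transliteration of B: token-list templates (A/B placeholders + literals, the int/str tokens of Source B
-- become an inductive), one join-based render pass, dict lookup with default, soccer suffix product
inductive QTok where
  | A : QTok
  | B : QTok
  | lit : String → QTok
deriving DecidableEq, Repr

def b_templates : PySem.Dict String (List (List QTok)) :=
  PySem.Dict.ofList
    [("soccer",
      [[.A, .lit " vs ", .B, .lit " match preview"],
       [.A, .lit " starting XI vs ", .B],
       [.B, .lit " manager tactical analysis"],
       [.A, .lit " vs ", .B, .lit " injury update"],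
       [.A, .lit " vs ", .B, .lit " press conference"]]),
     ("basketball",
      [[.A, .lit " vs ", .B, .lit " season stats comparison"],
       [.A, .lit " star player performance vs ", .B],
       [.B, .lit " injury report and depth chart"]]),
     ("tennis",
      [[.A, .lit " vs ", .B, .lit " head to head statistics"],
       [.A, .lit " recent tournament form"],
       [.B, .lit " surface preference analysis"]]),
     ("american football",
      [[.A, .lit " vs ", .B, .lit " season record"],
       [.A, .lit " offensive strategy vs ", .B, .lit " defense"],
       [.B, .lit " quarterback performance analysis"]]),
     ("baseball",
      [[.A, .lit " vs ", .B, .lit " pitching matchup"],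
       [.A, .lit " batting order analysis"],
       [.B, .lit " bullpen situation report"]]),
     ("hockey",
      [[.A, .lit " vs ", .B, .lit " power play statistics"],
       [.A, .lit " goaltender matchup analysis"],
       [.B, .lit " injury report and lineup news"]]),
     ("golf",
      [[.A, .lit " vs ", .B, .lit " course history"],
       [.A, .lit " recent tournament results"],
       [.B, .lit " putting statistics this season"]])]

def b_default : List (List QTok) :=
  [[.A, .lit " vs ", .B, .lit " latest news"],
   [.A, .lit " key players to watch vs ", .B],
   [.B, .lit " tactical analysis and strategy"]]

def b_soccer_suffixes : List String := [" site:bbc.com", " site:espn.com"]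

def b_render (team_a : String) (team_b : String) (tmpl : List QTok) : String :=
  PySem.Str.join "" (tmpl.map fun tok =>
    match tok with
    | .A => team_a
    | .B => team_b
    | .lit s => s)

def generate_sport_specific_queries_py_alt (team_a : String) (team_b : String) (sport_type : String) : List String :=
  let queries := (b_templates.getD sport_type b_default).map (b_render team_a team_b)
  if sport_type == "soccer" then
    queries.flatMap (fun q => ("" :: b_soccer_suffixes).map (fun suf => q ++ suf))
  else
    queries

-- ===== PRECONDITION & SPEC =====
def Spec_generate_sport_specific_queries_py (team_a : String) (team_b : String) (sport_type : String) (out : List String) : Prop := out = generate_sport_specific_queries_py_alt team_a team_b sport_type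
instance (team_a : String) (team_b : String) (sport_type : String) (out : List String) : Decidable (Spec_generate_sport_specific_queries_py team_a team_b sport_type out) := by unfold Spec_generate_sport_specific_queries_py; infer_instance

-- ===== CLAIM =====
def Claim_equal_generate_sport_specific_queries_py : Prop := ∀ (team_a : String) (team_b : String) (sport_type : String), Dom_generate_sport_specific_queries_py team_a team_b sport_type → Spec_generate_sport_specific_queries_py team_a team_b sport_type (generate_sport_specific_queries_py team_a team_b sport_type)

-- ===== LEMMAS AND PROOFS =====
-- two strings are equal when their char lists are
theorem pv_eq_of_toList (s t : String) (h : s.toList = t.toList) : s = t := by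
  rw [← String.ofList_toList (s := s), h, String.ofList_toList]

-- ===== VERDICT =====
theorem generate_sport_specific_queries_py_spec : Claim_equal_generate_sport_specific_queries_py := by
  intro team_a team_b sport_type _
  unfold Spec_generate_sport_specific_queries_py
  unfold generate_sport_specific_queries_py generate_sport_specific_queries_py_alt
  unfold b_templates b_default b_render b_soccer_suffixes a_soccer_sites a_site_hint
  simp only [PySem.Dict.ofList, PySem.Dict.update]
  by_cases h1 : sport_type = "soccer" <;>
  by_cases h2 : sport_type = "basketball" <;>
  by_cases h3 : sport_type = "tennis" <;>
  by_cases h4 : sport_type = "american football" <;>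
  by_cases h5 : sport_type = "baseball" <;>
  by_cases h6 : sport_type = "hockey" <;>
  by_cases h7 : sport_type = "golf" <;>
  simp_all [List.foldl, List.flatMap, PySem.Dict.getD_insert, PySem.Dict.getD_empty,
    PySem.Str.join]
  all_goals and_intros
  all_goals apply pv_eq_of_toList
  all_goals simp [PySem.Chars.join, List.intercalate, String.toList_append, String.toList_ofList]
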